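-- pv_equiv track=rewrite | github.com/DanielMariooR/TF-IDF-Search-Engine | src/search.py | Vectorizer
-- ===== SOURCE A (Python) =====
-- def Vectorizer(querylib,bag_of_words):
-- #{Mengubah array berisi kata-kata menjadi vektor yang dapat dihitung dalam cosine similarity}
-- #{Parameter fungsi berupa library kata-kata dan array yang berisi kata kata yang telah di preprocessing}
--     n = len(querylib)
--     vector = [0 for i in range(n)]
--
--     for i in range(n):
--         for word in bag_of_words:
--             if querylib[i] == word:
--                 vector[i] += 1
--     return vector
-- ===== SOURCE B (Python) =====
-- def Vectorizer(querylib, bag_of_words):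
--     counts = {}
--     for word in bag_of_words:
--         counts[word] = counts.get(word, 0) + 1
--     return [counts.get(term, 0) for term in querylib]
-- ===== Notes on version B (the rewrite author's own statement) =====
-- stated objective: faster
-- what changed: Replaces the nested loop (rescanning bag_of_words for every query term) with a single counting pass over bag_of_words into a dict, followed by one lookup per query term.
import Mathlib
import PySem

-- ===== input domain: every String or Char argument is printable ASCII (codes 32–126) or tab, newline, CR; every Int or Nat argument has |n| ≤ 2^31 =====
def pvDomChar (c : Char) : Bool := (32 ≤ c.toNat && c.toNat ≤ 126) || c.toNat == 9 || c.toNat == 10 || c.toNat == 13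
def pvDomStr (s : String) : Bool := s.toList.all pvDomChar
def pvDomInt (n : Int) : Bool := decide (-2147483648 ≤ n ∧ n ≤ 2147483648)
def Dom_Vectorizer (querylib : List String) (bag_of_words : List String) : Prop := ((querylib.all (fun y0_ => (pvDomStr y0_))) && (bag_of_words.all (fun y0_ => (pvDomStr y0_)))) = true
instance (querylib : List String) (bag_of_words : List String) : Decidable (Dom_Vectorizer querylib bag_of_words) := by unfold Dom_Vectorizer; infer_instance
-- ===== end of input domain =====

-- B replaces A's nested loop with one counting pass over bag_of_words into a dict plus one
-- lookup per query term (objective: faster, O(q+b) instead of O(q*b)).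

-- ===== PORT A =====
-- literal port of A: zero vector, then for each index i, for each word, bump vector[i] on match
def Vectorizer (querylib : List String) (bag_of_words : List String) : List Int :=
  let n : Int := querylib.length
  let vector : List Int := (PySem.List.pyRange 0 n 1).map (fun _ => 0)
  (PySem.List.pyRange 0 n 1).foldl (fun vec i =>
    bag_of_words.foldl (fun vec word =>
      if PySem.List.pyGetD querylib i "" == word then
        -- vector[i] += 1 ; i ∈ range(n) so both accesses are in range
        PySem.List.pySetD vec i (PySem.List.pyGetD vec i 0 + 1)
      else vec) vec) vector

-- ===== PORT B =====
-- literal port of Source B: counts = {}; for word: counts[word] = counts.get(word,0)+1; then map lookups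
def Vectorizer_alt (querylib : List String) (bag_of_words : List String) : List Int :=
  let counts : PySem.Dict String Int :=
    bag_of_words.foldl (fun d word => d.insert word (d.getD word 0 + 1)) PySem.Dict.empty
  querylib.map (fun term => counts.getD term 0)

-- ===== PRECONDITION & SPEC =====
def Spec_Vectorizer (querylib : List String) (bag_of_words : List String) (out : List Int) : Prop := out = Vectorizer_alt querylib bag_of_words
instance (querylib : List String) (bag_of_words : List String) (out : List Int) : Decidable (Spec_Vectorizer querylib bag_of_words out) := by unfold Spec_Vectorizer; infer_instance

-- ===== CLAIM (what is proved, stated in full; the proofs are below) =====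
def Claim_equal_Vectorizer : Prop := ∀ (querylib : List String) (bag_of_words : List String), Dom_Vectorizer querylib bag_of_words → Spec_Vectorizer querylib bag_of_words (Vectorizer querylib bag_of_words)

-- ===== LEMMAS AND PROOFS =====

-- the per-index update A's outer loop performs, once the inner loop is summarised
def stepFn (q bag : List String) : List Int → Nat → List Int :=
  fun v j => v.set j (v.getD j 0 + bag.count (q.getD j ""))

theorem getD_set_self (l : List Int) (k : Nat) (v : Int) (h : k < l.length) :
    (l.set k v).getD k 0 = v := by
  simp [List.getD_eq_getElem?_getD, h]

theorem getD_set_ne (l : List Int) (k j : Nat) (v : Int) (h : k ≠ j) :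
    (l.set k v).getD j 0 = l.getD j 0 := by
  simp [List.getD_eq_getElem?_getD, h]

-- B's counting loop: the dict built by repeated insert counts occurrences.
theorem counts_loop (bag : List String) (d : PySem.Dict String Int) (t : String) :
    (bag.foldl (fun d word => d.insert word (d.getD word 0 + 1)) d).getD t 0
      = d.getD t 0 + bag.count t := by
  induction bag generalizing d with
  | nil => simp
  | cons w bag ih =>
    simp only [List.foldl_cons, ih, PySem.Dict.getD_insert, List.count_cons]
    by_cases h : t = w
    · subst h
      simp only [BEq.rfl, if_pos]
      push_cast
      ring
    · have hw : (w == t) = false := by simp [Ne.symm h]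
      simp [h, hw]

-- A's inner loop over bag_of_words, at a fixed Nat index k, adds the count of t at slot k.
theorem inner_loop (bag : List String) (vec : List Int) (k : Nat) (t : String) :
    bag.foldl (fun v word => if t == word then v.set k (v.getD k 0 + 1) else v) vec
      = vec.set k (vec.getD k 0 + bag.count t) := by
  induction bag generalizing vec with
  | nil =>
    by_cases hk : k < vec.length
    · simp [List.getD_eq_getElem?_getD, List.getElem?_eq_getElem hk, List.set_getElem_self]
    · rw [show vec.set k (vec.getD k 0 + (↑(List.count t []) : Int)) = vec from
        List.set_eq_of_length_le (by omega)]
      rfl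
  | cons w bag ih =>
    simp only [List.foldl_cons, List.count_cons]
    by_cases h : t = w
    · subst h
      rw [if_pos (by simp), ih]
      by_cases hk : k < vec.length
      · rw [getD_set_self vec k _ hk, List.set_set]
        congr 1
        simp
        ring
      · have hle : vec.length ≤ k := by omega
        simp only [List.set_eq_of_length_le hle]
    · rw [if_neg (by simp [h]), ih]
      simp [beq_iff_eq, Ne.symm h]

theorem outer_len (q bag : List String) (m : Nat) (vec : List Int) :
    ((List.range m).foldl (stepFn q bag) vec).length = vec.length := by
  induction m with
  | zero => rfl
  | succ m ih =>
    rw [List.range_succ, List.foldl_append, List.foldl_cons, List.foldl_nil, stepFn,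
      List.length_set]
    exact ih

theorem outer_get (q bag : List String) (m : Nat) (vec : List Int) (j : Nat) :
    ((List.range m).foldl (stepFn q bag) vec).getD j 0
      = if j < m ∧ j < vec.length then vec.getD j 0 + bag.count (q.getD j "")
        else vec.getD j 0 := by
  induction m with
  | zero => simp
  | succ m ih =>
    rw [List.range_succ, List.foldl_append, List.foldl_cons, List.foldl_nil, stepFn]
    by_cases hj : j = m
    · subst hj
      by_cases hlt : j < vec.length
      · rw [getD_set_self _ j _ (by rw [outer_len]; exact hlt), ih]
        simp [hlt]
      · rw [List.set_eq_of_length_le (by rw [outer_len]; omega), ih]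
        simp [hlt]
    · rw [getD_set_ne _ m j _ (Ne.symm hj), ih]
      by_cases h : j < m
      · simp [h, Nat.lt_succ_of_lt h]
      · have h2 : ¬ j < m + 1 := by omega
        simp [h, h2]

-- the simplified closed form of each port
theorem altEq (q bag : List String) :
    Vectorizer_alt q bag = q.map (fun t => (bag.count t : Int)) := by
  unfold Vectorizer_alt
  simp only [counts_loop, PySem.Dict.getD_empty, zero_add]

theorem aEq (q bag : List String) :
    Vectorizer q bag = q.map (fun t => (bag.count t : Int)) := by
  simp only [Vectorizer]
  rw [PySem.List.pyRange_one]
  simp only [sub_zero, Int.toNat_natCast, List.foldl_map, List.map_map, zero_add]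
  have hbody : (fun (vec : List Int) (j : Nat) =>
      bag.foldl (fun v word =>
        if PySem.List.pyGetD q ((j:Int)) "" == word then
          PySem.List.pySetD v ((j:Int)) (PySem.List.pyGetD v ((j:Int)) 0 + 1)
        else v) vec)
      = stepFn q bag := by
    funext vec j
    simp only [PySem.List.pyGetD_natCast, PySem.List.pySetD_natCast, stepFn]
    exact inner_loop bag vec j (q.getD j "")
  rw [hbody]
  have hinit : (List.range q.length).map ((fun _ => (0:Int)) ∘ fun k => ((k:Nat):Int))
      = List.replicate q.length (0:Int) := by
    rw [show ((fun _ => (0:Int)) ∘ fun k : Nat => ((k:Nat):Int)) = fun _ => (0:Int) from rfl]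
    simp [List.map_const']
  rw [hinit]
  apply List.ext_getElem
  · rw [outer_len]; simp
  · intro i h1 h2
    have hi : i < q.length := by simpa using h2
    have hgd : ((List.range q.length).foldl (stepFn q bag) (List.replicate q.length (0:Int)))[i]
        = ((List.range q.length).foldl (stepFn q bag) (List.replicate q.length (0:Int))).getD i 0 := by
      rw [List.getD_eq_getElem?_getD, List.getElem?_eq_getElem h1]
      rfl
    rw [hgd, outer_get]
    simp [hi, List.getD_eq_getElem?_getD]

-- ===== VERDICT (by name: the statement is the Claim_ definition above) =====
theorem Vectorizer_spec : Claim_equal_Vectorizer := by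
  intro q bag _
  unfold Spec_Vectorizer
  rw [aEq, altEq]
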